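-- pv_equiv track=rewrite | github.com/yilinzhangAndy/Peer-Helper-Training-chatbot | scripts/parse_transcripts_to_fewshot.py | _infer_student_from_id_file
-- ===== SOURCE A (Python) =====
-- from typing import List, Dict, Tuple, Set
--
-- def _normalize_speaker(speaker: str) -> str:
--     """将 'Daniel Mata Daniel Mata' 规范为 'Daniel Mata'。"""
--     s = speaker.strip()
--     parts = s.split()
--     if len(parts) >= 4 and parts[:2] == parts[2:4]:
--         return " ".join(parts[:2])
--     return s
--
-- def _infer_student_from_id_file(turns: List[Tuple[str, str]]) -> Set[str]:
--     """
--     ID 文件无学生姓名：取前两个不同说话人，假设先出现的为顾问、后出现的为学生。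
--     """
--     seen = []
--     for speaker, _ in turns[:15]:
--         s = _normalize_speaker(speaker)
--         if not s or len(s) < 4 or any(c.isdigit() for c in s):
--             continue
--         if s not in seen:
--             seen.append(s)
--         if len(seen) >= 2:
--             return {seen[1], seen[1].lower(), seen[1].title()}
--     return set()
-- ===== SOURCE B (Python) =====
-- from typing import List, Tuple, Set
--
-- def _normalize_speaker(speaker: str) -> str:
--     s = speaker.strip()
--     parts = s.split()
--     if len(parts) >= 4 and parts[:2] == parts[2:4]:
--         return " ".join(parts[:2])
--     return s
--
-- def _valid(s: str) -> bool:
--     return bool(s) and len(s) >= 4 and not any(c.isdigit() for c in s)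
--
-- def _first_valid(speakers: List[str]):
--     # recursive search: first valid normalized name, or None
--     if not speakers:
--         return None
--     s = _normalize_speaker(speakers[0])
--     return s if _valid(s) else _first_valid(speakers[1:])
--
-- def _first_valid_except(speakers: List[str], exclude: str):
--     # recursive search: first valid normalized name different from `exclude`, or None
--     if not speakers:
--         return None
--     s = _normalize_speaker(speakers[0])
--     if _valid(s) and s != exclude:
--         return s
--     return _first_valid_except(speakers[1:], exclude)
--
-- def _infer_student_from_id_file(turns: List[Tuple[str, str]]) -> Set[str]:
--     # Two independent searches: the advisor is the first valid name, the
--     # student the first valid name different from the advisor. No dedup list.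
--     speakers = [sp for sp, _ in turns[:15]]
--     advisor = _first_valid(speakers)
--     if advisor is None:
--         return set()
--     student = _first_valid_except(speakers, advisor)
--     if student is None:
--         return set()
--     return {student, student.lower(), student.title()}
-- ===== Notes on version B (the rewrite author's own statement) =====
-- stated objective: alternative
-- what changed: Replaces A's single pass that accumulates a dedup list and early-returns on its second entry by two independent recursive searches over the speakers of turns[:15]: find the first valid normalized name (advisor), then find the first valid name different from it (student); no seen-list is maintained.
import Mathlib
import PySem

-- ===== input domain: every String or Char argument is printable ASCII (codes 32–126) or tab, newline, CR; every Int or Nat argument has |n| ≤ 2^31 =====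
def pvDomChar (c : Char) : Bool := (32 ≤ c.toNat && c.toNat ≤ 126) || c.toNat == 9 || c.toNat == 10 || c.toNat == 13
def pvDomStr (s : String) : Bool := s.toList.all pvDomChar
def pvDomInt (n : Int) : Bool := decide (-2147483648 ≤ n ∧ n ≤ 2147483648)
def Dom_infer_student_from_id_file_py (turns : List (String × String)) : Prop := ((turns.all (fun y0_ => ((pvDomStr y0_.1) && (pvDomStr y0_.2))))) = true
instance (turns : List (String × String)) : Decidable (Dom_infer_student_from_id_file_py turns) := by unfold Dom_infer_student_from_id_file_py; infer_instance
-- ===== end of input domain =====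

-- B replaces A's accumulate-and-early-return dedup loop by two independent recursive
-- searches (first valid name, then first valid name different from it); objective: alternative.


-- ===== PORT A =====

-- shared helper: port of _normalize_speaker (used by both Pythons)
def pvNormalizeSpeaker (speaker : String) : String :=
  let s := PySem.Str.strip speaker
  let parts := PySem.Str.split₀ s
  if 4 ≤ parts.length ∧ PySem.List.slice parts (some 0) (some 2) = PySem.List.slice parts (some 2) (some 4) then
    PySem.Str.join " " (PySem.List.slice parts (some 0) (some 2))
  else s

-- shared helper: port of Python's str.title() (exact on the ASCII domain: a letter
-- is uppercased after a non-letter and lowercased after a letter)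
def pvTitleChars : List Char → Bool → List Char
  | [], _ => []
  | c :: cs, prevAlpha =>
    (if PySem.Chars.isalpha c then
      (if prevAlpha then PySem.Chars.lowerChar c else PySem.Chars.upperChar c)
     else c) :: pvTitleChars cs (PySem.Chars.isalpha c)

def pvTitle (s : String) : String := String.ofList (pvTitleChars s.toList false)

-- the three-element set both Pythons return: {x, x.lower(), x.title()}
def pvOut (x : String) : List String :=
  PySem.Set.ofList [x, PySem.Str.lower x, pvTitle x]

-- A's loop over turns[:15] carrying the `seen` accumulator, with the early return
def pvInferLoop : List (String × String) → List String → List String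
  | [], _ => []
  | (speaker, _) :: rest, seen =>
    let s := pvNormalizeSpeaker speaker
    if s == "" || PySem.Str.len s < 4 || s.toList.any PySem.Chars.isdigit then
      pvInferLoop rest seen
    else
      let seen' := if seen.contains s then seen else seen ++ [s]
      if 2 ≤ seen'.length then pvOut (PySem.List.pyGetD seen' 1 "")
      else pvInferLoop rest seen'

def infer_student_from_id_file_py (turns : List (String × String)) : List String :=
  pvInferLoop (PySem.List.slice turns (some 0) (some 15)) []

-- ===== PORT B =====

def pvValid (s : String) : Bool :=
  !(s == "") && !(PySem.Str.len s < 4) && !(s.toList.any PySem.Chars.isdigit)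

-- recursive search: first valid normalized name, or none
def pvFirstValid : List String → Option String
  | [] => none
  | sp :: rest =>
    let s := pvNormalizeSpeaker sp
    if pvValid s then some s else pvFirstValid rest

-- recursive search: first valid normalized name different from `ex`, or none
def pvFirstValidExcept : List String → String → Option String
  | [], _ => none
  | sp :: rest, ex =>
    let s := pvNormalizeSpeaker sp
    if pvValid s && s != ex then some s else pvFirstValidExcept rest ex

def infer_student_from_id_file_py_alt (turns : List (String × String)) : List String :=
  let speakers := (PySem.List.slice turns (some 0) (some 15)).map Prod.fst
  match pvFirstValid speakers with
  | none => []
  | some advisor =>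
    match pvFirstValidExcept speakers advisor with
    | none => []
    | some student => PySem.Set.ofList [student, PySem.Str.lower student, pvTitle student]

-- ===== PRECONDITION & SPEC =====
def Spec_infer_student_from_id_file_py (turns : List (String × String)) (out : List String) : Prop := out = infer_student_from_id_file_py_alt turns
instance (turns : List (String × String)) (out : List String) : Decidable (Spec_infer_student_from_id_file_py turns out) := by unfold Spec_infer_student_from_id_file_py; infer_instance

-- ===== CLAIM (what is proved, stated in full; the proofs are below) =====
def Claim_equal_infer_student_from_id_file_py : Prop := ∀ (turns : List (String × String)), Dom_infer_student_from_id_file_py turns → Spec_infer_student_from_id_file_py turns (infer_student_from_id_file_py turns)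

-- ===== LEMMAS AND PROOFS =====

-- B's keep-predicate is the negation of A's skip-predicate
lemma pvValid_iff (s : String) :
    pvValid s = !(s == "" || PySem.Str.len s < 4 || s.toList.any PySem.Chars.isdigit) := by
  unfold pvValid
  rw [Bool.not_or, Bool.not_or, Bool.and_assoc]

lemma pvGetD_two (a s : String) : PySem.List.pyGetD [a, s] 1 "" = s := by
  simp [PySem.List.pyGetD, PySem.List.pyGet?, PySem.List.pyIdx?]

-- A's loop after the first valid name `a` was recorded = B's second search
lemma pvLoop_one (xs : List (String × String)) (a : String) :
    pvInferLoop xs [a] =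
      (match pvFirstValidExcept (xs.map Prod.fst) a with
       | none => []
       | some x => pvOut x) := by
  induction xs with
  | nil => rfl
  | cons hd tl ih =>
    obtain ⟨sp, o⟩ := hd
    simp only [pvInferLoop, List.map_cons, pvFirstValidExcept]
    generalize pvNormalizeSpeaker sp = s
    by_cases hskip : (s == "" || PySem.Str.len s < 4 || s.toList.any PySem.Chars.isdigit) = true
    · have hval : pvValid s = false := by rw [pvValid_iff, hskip]; rfl
      rw [if_pos hskip, if_neg (by simp [hval])]
      exact ih
    · have hcond : (s == "" || PySem.Str.len s < 4 || s.toList.any PySem.Chars.isdigit) = false :=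
        Bool.eq_false_iff.mpr hskip
      have hval : pvValid s = true := by rw [pvValid_iff, hcond]; rfl
      rw [if_neg hskip]
      by_cases heq : a = s
      · subst heq
        have hseen : (if [a].contains a then [a] else [a] ++ [a]) = [a] := by simp
        rw [hseen, if_neg (by simp), if_neg (by simp)]
        exact ih
      · have hne : ¬ s = a := fun h => heq h.symm
        have hseen : (if [a].contains s then [a] else [a] ++ [s]) = [a, s] := by simp [hne]
        have hcondB : (pvValid s && (s != a)) = true := by
          rw [hval, Bool.true_and, bne_iff_ne]
          exact hne
        rw [hseen, if_pos hcondB, if_pos (by simp), pvGetD_two]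

-- A's loop with empty `seen` = B's two searches
lemma pvLoop_nil (xs : List (String × String)) :
    pvInferLoop xs [] =
      (match pvFirstValid (xs.map Prod.fst) with
       | none => []
       | some a =>
         match pvFirstValidExcept (xs.map Prod.fst) a with
         | none => []
         | some x => pvOut x) := by
  induction xs with
  | nil => rfl
  | cons hd tl ih =>
    obtain ⟨sp, o⟩ := hd
    simp only [pvInferLoop, List.map_cons, pvFirstValid, pvFirstValidExcept]
    generalize pvNormalizeSpeaker sp = s
    by_cases hskip : (s == "" || PySem.Str.len s < 4 || s.toList.any PySem.Chars.isdigit) = true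
    · have hval : pvValid s = false := by rw [pvValid_iff, hskip]; rfl
      rw [if_pos hskip, if_neg (by simp [hval])]
      simp only [hval]
      exact ih
    · have hcond : (s == "" || PySem.Str.len s < 4 || s.toList.any PySem.Chars.isdigit) = false :=
        Bool.eq_false_iff.mpr hskip
      have hval : pvValid s = true := by rw [pvValid_iff, hcond]; rfl
      rw [if_neg hskip]
      simp only [List.contains_nil, Bool.false_eq_true, if_false, List.nil_append,
        List.length_singleton, hval, if_true]
      rw [if_neg (by omega), if_neg (by simp)]
      exact pvLoop_one tl s

-- ===== VERDICT (by name: the statement is the Claim_ definition above) =====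
theorem infer_student_from_id_file_py_spec : Claim_equal_infer_student_from_id_file_py := by
  intro turns _
  show infer_student_from_id_file_py turns = infer_student_from_id_file_py_alt turns
  exact pvLoop_nil (PySem.List.slice turns (some 0) (some 15))
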